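-- pv_equiv track=rewrite | github.com/w123-cloud430/FSCFusion | models/fourier_modules.py | _get_zigzag_indices
-- ===== SOURCE A (Python) =====
-- def _get_zigzag_indices(h, w):
--
--     indices = []
--     for s in range(h + w - 1):
--         if s % 2 == 0:  #
--             for i in range(min(s, h - 1), max(0, s - w + 1) - 1, -1):
--                 j = s - i
--                 if j < w:
--                     indices.append(i * w + j)
--         else:  #
--             for i in range(max(0, s - w + 1), min(s, h - 1) + 1):
--                 j = s - i
--                 if j < w:
--                     indices.append(i * w + j)
--     return indices
-- ===== SOURCE B (Python) =====
-- def _get_zigzag_indices(h, w):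
--     if h <= 0 or w <= 0:
--         return []
--     indices = []
--     i = j = 0
--     up = True
--     for _ in range(h * w):
--         indices.append(i * w + j)
--         if up:
--             if j == w - 1:
--                 i += 1
--                 up = False
--             elif i == 0:
--                 j += 1
--                 up = False
--             else:
--                 i -= 1
--                 j += 1
--         else:
--             if i == h - 1:
--                 j += 1
--                 up = True
--             elif j == 0:
--                 i += 1
--                 up = True
--             else:
--                 i += 1
--                 j -= 1
--     return indices
-- ===== Notes on version B (the rewrite author's own statement) =====
-- stated objective: alternative
-- what changed: Replaces the per-diagonal nested index-range loops by a single cursor simulation: one loop of exactly h*w steps moving a position (i,j) with an up/down direction flag and bouncing at the borders.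
import Mathlib
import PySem

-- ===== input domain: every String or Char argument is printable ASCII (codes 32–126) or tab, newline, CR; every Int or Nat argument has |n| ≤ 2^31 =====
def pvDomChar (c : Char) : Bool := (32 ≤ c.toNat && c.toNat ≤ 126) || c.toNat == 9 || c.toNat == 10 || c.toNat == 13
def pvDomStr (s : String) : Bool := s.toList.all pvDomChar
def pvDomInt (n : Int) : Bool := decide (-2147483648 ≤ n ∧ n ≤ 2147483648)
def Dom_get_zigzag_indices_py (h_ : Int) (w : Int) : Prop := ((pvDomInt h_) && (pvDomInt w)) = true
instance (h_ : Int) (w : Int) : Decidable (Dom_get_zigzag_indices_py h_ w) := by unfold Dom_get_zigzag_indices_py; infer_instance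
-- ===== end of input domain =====

-- B replaces A's per-diagonal nested range loops by a single h*w-step cursor walk with a direction flag (objective: alternative, same cost).

-- ===== PORT A =====
def get_zigzag_indices_py (h_ : Int) (w : Int) : List Int :=
  (PySem.List.pyRange 0 (h_ + w - 1) 1).foldl (fun indices s =>
    if PySem.Int.mod s 2 = 0 then
      (PySem.List.pyRange (min s (h_ - 1)) (max 0 (s - w + 1) - 1) (-1)).foldl
        (fun indices i => let j := s - i; if j < w then indices ++ [i * w + j] else indices) indices
    else
      (PySem.List.pyRange (max 0 (s - w + 1)) (min s (h_ - 1) + 1) 1).foldl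
        (fun indices i => let j := s - i; if j < w then indices ++ [i * w + j] else indices) indices) []

-- ===== PORT B =====
-- the for-loop of Source B over range(h*w), as a fuel recursion on the loop counter with the
-- cursor (i, j), the direction flag `up` and the accumulated list as state
def zigzagWalk (h_ : Int) (w : Int) : Nat → Int → Int → Bool → List Int → List Int
  | 0, _, _, _, indices => indices
  | n+1, i, j, up, indices =>
    let indices := indices ++ [i * w + j]
    if up then
      if j = w - 1 then zigzagWalk h_ w n (i+1) j false indices
      else if i = 0 then zigzagWalk h_ w n i (j+1) false indices
      else zigzagWalk h_ w n (i-1) (j+1) true indices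
    else
      if i = h_ - 1 then zigzagWalk h_ w n i (j+1) true indices
      else if j = 0 then zigzagWalk h_ w n (i+1) j true indices
      else zigzagWalk h_ w n (i+1) (j-1) false indices

def get_zigzag_indices_py_alt (h_ : Int) (w : Int) : List Int :=
  if h_ ≤ 0 ∨ w ≤ 0 then [] else zigzagWalk h_ w (h_ * w).toNat 0 0 true []

-- ===== PRECONDITION & SPEC =====
def Spec_get_zigzag_indices_py (h_ : Int) (w : Int) (out : List Int) : Prop := out = get_zigzag_indices_py_alt h_ w
instance (h_ : Int) (w : Int) (out : List Int) : Decidable (Spec_get_zigzag_indices_py h_ w out) := by unfold Spec_get_zigzag_indices_py; infer_instance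

-- ===== CLAIM (what is proved, stated in full; the proofs are below) =====
def Claim_equal_get_zigzag_indices_py : Prop := ∀ (h_ : Int) (w : Int), Dom_get_zigzag_indices_py h_ w → Spec_get_zigzag_indices_py h_ w (get_zigzag_indices_py h_ w)

-- ===== LEMMAS AND PROOFS =====

-- the cells of diagonal s, in the order A emits them
def zzDiag (h_ w s : Int) : List Int :=
  if PySem.Int.mod s 2 = 0 then
    (PySem.List.pyRange (min s (h_ - 1)) (max 0 (s - w + 1) - 1) (-1)).map (fun i => i * w + (s - i))
  else
    (PySem.List.pyRange (max 0 (s - w + 1)) (min s (h_ - 1) + 1) 1).map (fun i => i * w + (s - i))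

lemma inner_foldl (w s : Int) (l : List Int) (hmem : ∀ i ∈ l, s - i < w) (acc : List Int) :
    l.foldl (fun indices i => let j := s - i; if j < w then indices ++ [i * w + j] else indices) acc
      = acc ++ l.map (fun i => i * w + (s - i)) := by
  have : (fun (indices : List Int) (i : Int) =>
      let j := s - i; if j < w then indices ++ [i * w + j] else indices)
      = fun indices i => if s - i < w then indices ++ [i * w + (s - i)] else indices := rfl
  rw [this, PySem.List.foldl_append_ite (fun i => s - i < w) (fun i => i * w + (s - i))]
  congr 1
  rw [List.filter_eq_self.2 (by intro a ha; simpa using hmem a ha)]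

-- A = concatenation of the diagonals
lemma portA_eq_flatMap (h_ w : Int) :
    get_zigzag_indices_py h_ w = (PySem.List.pyRange 0 (h_ + w - 1) 1).flatMap (zzDiag h_ w) := by
  unfold get_zigzag_indices_py
  refine Eq.trans (PySem.List.foldl_congr_mem _ _ (fun indices s => indices ++ zzDiag h_ w s) _ ?_)
    (by rw [PySem.List.foldl_append_eq_flatMap]; simp)
  intro acc s hs
  show _ = acc ++ zzDiag h_ w s
  unfold zzDiag
  split
  · refine inner_foldl w s _ ?_ acc
    intro i hi
    rw [PySem.List.mem_pyRange_neg_one] at hi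
    omega
  · refine inner_foldl w s _ ?_ acc
    intro i hi
    rw [PySem.List.mem_pyRange_one] at hi
    omega

-- one-step unfolding of the walk (direction fixed)
lemma zigzagWalk_succ_true (h_ w : Int) (n : Nat) (i j : Int) (acc : List Int) :
    zigzagWalk h_ w (n+1) i j true acc =
      (if j = w - 1 then zigzagWalk h_ w n (i+1) j false (acc ++ [i*w+j])
       else if i = 0 then zigzagWalk h_ w n i (j+1) false (acc ++ [i*w+j])
       else zigzagWalk h_ w n (i-1) (j+1) true (acc ++ [i*w+j])) := rfl

lemma zigzagWalk_succ_false (h_ w : Int) (n : Nat) (i j : Int) (acc : List Int) :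
    zigzagWalk h_ w (n+1) i j false acc =
      (if i = h_ - 1 then zigzagWalk h_ w n i (j+1) true (acc ++ [i*w+j])
       else if j = 0 then zigzagWalk h_ w n (i+1) j true (acc ++ [i*w+j])
       else zigzagWalk h_ w n (i+1) (j-1) false (acc ++ [i*w+j])) := rfl

-- fuel for the remaining diagonals from s on
def zzFuel (h_ w s : Int) : Nat :=
  ((PySem.List.pyRange s (h_ + w - 1) 1).map
    (fun u => (min u (h_ - 1) - max 0 (u - w + 1) + 1).toNat)).sum

-- run along one even (up-right) diagonal
lemma runE (h_ w : Int) (s : Int) :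
    ∀ (k n : Nat) (i : Int) (acc : List Int),
      i = max 0 (s - w + 1) + k → i ≤ min s (h_ - 1) →
      zigzagWalk h_ w (n + (k+1)) i (s - i) true acc =
      zigzagWalk h_ w n (max 0 (s + 1 - w + 1)) ((s+1) - max 0 (s + 1 - w + 1)) false
        (acc ++ (PySem.List.pyRange i (max 0 (s - w + 1) - 1) (-1)).map (fun i => i * w + (s - i))) := by
  intro k
  induction k with
  | zero =>
    intro n i acc hieq hile
    rw [show n + (0 + 1) = n + 1 by omega, zigzagWalk_succ_true]
    rw [PySem.List.pyRange_neg_one_cons (by omega), PySem.List.pyRange_neg_one_eq_nil (by omega)]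
    simp only [List.map_cons, List.map_nil]
    split_ifs with h1 h2
    · rw [show max 0 (s + 1 - w + 1) = i + 1 by omega]
      rw [show s + 1 - (i + 1) = s - i by omega]
    · subst h2
      rw [show max 0 (s + 1 - w + 1) = 0 by omega]
      rw [show s + 1 - (0:Int) = s - 0 + 1 by omega]
    · exfalso; omega
  | succ k ih =>
    intro n i acc hieq hile
    rw [show n + (k + 1 + 1) = (n + (k + 1)) + 1 by omega, zigzagWalk_succ_true]
    split_ifs with h1 h2
    · exfalso; omega
    · exfalso; omega
    · rw [show s - i + 1 = s - (i - 1) by omega]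
      rw [ih n (i - 1) _ (by omega) (by omega)]
      rw [PySem.List.pyRange_neg_one_cons (show max 0 (s - w + 1) - 1 < i by omega)]
      simp

-- run along one odd (down-left) diagonal
lemma runO (h_ w : Int) (s : Int) :
    ∀ (k n : Nat) (i : Int) (acc : List Int),
      i = min s (h_ - 1) - k → max 0 (s - w + 1) ≤ i →
      zigzagWalk h_ w (n + (k+1)) i (s - i) false acc =
      zigzagWalk h_ w n (min (s+1) (h_ - 1)) ((s+1) - min (s+1) (h_ - 1)) true
        (acc ++ (PySem.List.pyRange i (min s (h_ - 1) + 1) 1).map (fun i => i * w + (s - i))) := by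
  intro k
  induction k with
  | zero =>
    intro n i acc hieq hile
    rw [show n + (0 + 1) = n + 1 by omega, zigzagWalk_succ_false]
    rw [PySem.List.pyRange_one_cons (by omega), PySem.List.pyRange_one_eq_nil (by omega)]
    simp only [List.map_cons, List.map_nil]
    split_ifs with h1 h2
    · rw [show min (s + 1) (h_ - 1) = i by omega]
      rw [show s + 1 - i = s - i + 1 by omega]
    · rw [show min (s + 1) (h_ - 1) = i + 1 by omega]
      rw [show s + 1 - (i + 1) = s - i by omega]
    · exfalso; omega
  | succ k ih =>
    intro n i acc hieq hile
    rw [show n + (k + 1 + 1) = (n + (k + 1)) + 1 by omega, zigzagWalk_succ_false]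
    split_ifs with h1 h2
    · exfalso; omega
    · exfalso; omega
    · rw [show s - i - 1 = s - (i + 1) by omega]
      rw [ih n (i + 1) _ (by omega) (by omega)]
      rw [PySem.List.pyRange_one_cons (show i < min s (h_ - 1) + 1 by omega)]
      simp

-- the walk, started at the head of diagonal s with the matching direction and exactly the
-- fuel for the remaining cells, emits the remaining diagonals
lemma walk_main (h_ w : Int) (hh : 1 ≤ h_) (hw : 1 ≤ w) :
    ∀ (t : Nat) (s : Int) (acc : List Int), s = h_ + w - 1 - t → 0 ≤ s →
      zigzagWalk h_ w (zzFuel h_ w s)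
        (if PySem.Int.mod s 2 = 0 then min s (h_ - 1) else max 0 (s - w + 1))
        (s - (if PySem.Int.mod s 2 = 0 then min s (h_ - 1) else max 0 (s - w + 1)))
        (decide (PySem.Int.mod s 2 = 0)) acc =
      acc ++ (PySem.List.pyRange s (h_ + w - 1) 1).flatMap (zzDiag h_ w) := by
  intro t
  induction t with
  | zero =>
    intro s acc hseq hs0
    rw [PySem.List.pyRange_one_eq_nil (by omega)]
    unfold zzFuel
    rw [PySem.List.pyRange_one_eq_nil (by omega)]
    simp [zigzagWalk]
  | succ t ih =>
    intro s acc hseq hs0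
    have hsle : s ≤ h_ + w - 2 := by omega
    have hdiff : (0:Int) ≤ min s (h_ - 1) - max 0 (s - w + 1) := by omega
    have hfuel : zzFuel h_ w s
        = zzFuel h_ w (s+1) + ((min s (h_ - 1) - max 0 (s - w + 1)).toNat + 1) := by
      unfold zzFuel
      rw [PySem.List.pyRange_one_cons (by omega)]
      simp only [List.map_cons, List.sum_cons]
      omega
    have hmod : PySem.Int.mod s 2 = s % 2 := PySem.Int.mod_eq_emod_of_pos (by norm_num)
    have hmod1 : PySem.Int.mod (s+1) 2 = (s+1) % 2 := PySem.Int.mod_eq_emod_of_pos (by norm_num)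
    have hcons : PySem.List.pyRange s (h_ + w - 1) 1
        = s :: PySem.List.pyRange (s+1) (h_ + w - 1) 1 := PySem.List.pyRange_one_cons (by omega)
    by_cases hpar : PySem.Int.mod s 2 = 0
    · have hpar1 : ¬ PySem.Int.mod (s+1) 2 = 0 := by rw [hmod1]; rw [hmod] at hpar; omega
      rw [if_pos hpar, decide_eq_true hpar, hfuel]
      rw [runE h_ w s ((min s (h_ - 1) - max 0 (s - w + 1)).toNat)
        (zzFuel h_ w (s+1)) (min s (h_ - 1)) acc (by omega) (by omega)]
      have hrec := ih (s+1)
        (acc ++ (PySem.List.pyRange (min s (h_ - 1)) (max 0 (s - w + 1) - 1) (-1)).map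
          (fun i => i * w + (s - i))) (by omega) (by omega)
      rw [if_neg hpar1, decide_eq_false hpar1] at hrec
      rw [hrec, hcons, List.flatMap_cons]
      unfold zzDiag
      rw [if_pos hpar]
      simp [List.append_assoc]
    · have hpar1 : PySem.Int.mod (s+1) 2 = 0 := by rw [hmod1]; rw [hmod] at hpar; omega
      rw [if_neg hpar, decide_eq_false hpar, hfuel]
      rw [runO h_ w s ((min s (h_ - 1) - max 0 (s - w + 1)).toNat)
        (zzFuel h_ w (s+1)) (max 0 (s - w + 1)) acc (by omega) (by omega)]
      have hrec := ih (s+1)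
        (acc ++ (PySem.List.pyRange (max 0 (s - w + 1)) (min s (h_ - 1) + 1) 1).map
          (fun i => i * w + (s - i))) (by omega) (by omega)
      rw [if_pos hpar1, decide_eq_true hpar1] at hrec
      rw [hrec, hcons, List.flatMap_cons]
      unfold zzDiag
      rw [if_neg hpar]
      simp [List.append_assoc]

-- the total number of cells on all diagonals is h*w
lemma count_lemma (H W : Nat) (hh : 1 ≤ H) (hw : 1 ≤ W) :
    ((PySem.List.pyRange 0 ((H : Int) + W - 1) 1).map
      (fun s => min s ((H : Int) - 1) - max 0 (s - W + 1) + 1)).sum = (H : Int) * W := by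
  induction W, hw using Nat.le_induction with
  | base =>
    push_cast
    rw [show (H:Int) + 1 - 1 = (H:Int) by ring]
    rw [List.map_congr_left (g := fun _ => (1:Int)) (by
      intro a ha
      rw [PySem.List.mem_pyRange_one] at ha
      simp only
      omega)]
    rw [PySem.List.sum_map_const_int, PySem.List.length_pyRange_one]
    omega
  | succ W hw1 ih =>
    push_cast
    rw [show (H:Int) + ((W:Int) + 1) - 1 = ((H:Int) + W - 1) + 1 by ring]
    rw [PySem.List.pyRange_one_succ_right (by omega), List.map_append, List.sum_append]
    rw [PySem.List.pyRange_one_append 0 (W:Int) ((H:Int) + W - 1) (by omega) (by omega),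
        List.map_append, List.sum_append]
    have hfirst : ((PySem.List.pyRange 0 (W:Int) 1).map
          (fun s => min s ((H:Int) - 1) - max 0 (s - ((W:Int) + 1) + 1) + 1)).sum
        = ((PySem.List.pyRange 0 (W:Int) 1).map
          (fun s => min s ((H:Int) - 1) - max 0 (s - (W:Int) + 1) + 1)).sum := by
      rw [List.map_congr_left (g := fun s => min s ((H:Int) - 1) - max 0 (s - (W:Int) + 1) + 1) (by
        intro a ha
        rw [PySem.List.mem_pyRange_one] at ha
        simp only
        omega)]
    have hmid : ((PySem.List.pyRange (W:Int) ((H:Int) + W - 1) 1).map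
          (fun s => min s ((H:Int) - 1) - max 0 (s - ((W:Int) + 1) + 1) + 1)).sum
        = ((PySem.List.pyRange (W:Int) ((H:Int) + W - 1) 1).map
          (fun s => min s ((H:Int) - 1) - max 0 (s - (W:Int) + 1) + 1)).sum + ((H:Int) - 1) := by
      rw [List.map_congr_left
          (g := fun s => (min s ((H:Int) - 1) - max 0 (s - (W:Int) + 1) + 1) + 1) (by
        intro a ha
        rw [PySem.List.mem_pyRange_one] at ha
        simp only
        omega)]
      rw [PySem.List.sum_map_add_int, PySem.List.sum_map_const_int,
          PySem.List.length_pyRange_one]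
      omega
    have hlast : ([(H:Int) + W - 1].map
          (fun s => min s ((H:Int) - 1) - max 0 (s - ((W:Int) + 1) + 1) + 1)).sum = 1 := by
      rw [List.map_singleton, List.sum_singleton]
      omega
    rw [hfirst, hmid, hlast]
    have hsplit : ((PySem.List.pyRange 0 (W:Int) 1).map
          (fun s => min s ((H:Int) - 1) - max 0 (s - (W:Int) + 1) + 1)).sum
        + ((PySem.List.pyRange (W:Int) ((H:Int) + W - 1) 1).map
          (fun s => min s ((H:Int) - 1) - max 0 (s - (W:Int) + 1) + 1)).sum
        = (H:Int) * W := by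
      rw [← List.sum_append, ← List.map_append,
          ← PySem.List.pyRange_one_append 0 (W:Int) ((H:Int) + W - 1) (by omega) (by omega)]
      exact ih
    linarith [hsplit]

lemma sum_toNat_cast (g : Int → Int) :
    ∀ (l : List Int), (∀ x ∈ l, 0 ≤ g x) →
      ((l.map (fun x => (g x).toNat)).sum : Int) = (l.map g).sum := by
  intro l
  induction l with
  | nil => simp
  | cons a l ih =>
    intro hpos
    simp only [List.map_cons, List.sum_cons, Nat.cast_add]
    rw [ih (fun x hx => hpos x (List.mem_cons_of_mem a hx)),
        Int.toNat_of_nonneg (hpos a (List.mem_cons_self))]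

lemma fuel_total (h_ w : Int) (hh : 1 ≤ h_) (hw : 1 ≤ w) :
    zzFuel h_ w 0 = (h_ * w).toNat := by
  obtain ⟨H, rfl⟩ : ∃ H : Nat, h_ = (H : Int) := ⟨h_.toNat, (Int.toNat_of_nonneg (by omega)).symm⟩
  obtain ⟨W, rfl⟩ : ∃ W : Nat, w = (W : Int) := ⟨w.toNat, (Int.toNat_of_nonneg (by omega)).symm⟩
  have h1 : 1 ≤ H := by exact_mod_cast hh
  have w1 : 1 ≤ W := by exact_mod_cast hw
  unfold zzFuel
  have hc := sum_toNat_cast (fun u => min u ((H:Int) - 1) - max 0 (u - W + 1) + 1)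
    (PySem.List.pyRange 0 ((H:Int) + W - 1) 1) (by
      intro x hx
      rw [PySem.List.mem_pyRange_one] at hx
      simp only
      omega)
  beta_reduce at hc
  have hcnt := count_lemma H W h1 w1
  have hprod : ((H:Int) * (W:Int)) = ((H * W : Nat) : Int) := by push_cast; ring
  rw [hprod] at hcnt
  rw [hprod, Int.toNat_natCast]
  omega

-- ===== VERDICT (by name: the statement is the Claim_ definition above) =====
theorem get_zigzag_indices_py_spec : Claim_equal_get_zigzag_indices_py := by
  intro h_ w _
  unfold Spec_get_zigzag_indices_py get_zigzag_indices_py_alt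
  rw [portA_eq_flatMap]
  by_cases hcase : h_ ≤ 0 ∨ w ≤ 0
  · rw [if_pos hcase]
    rw [List.flatMap_eq_nil_iff.mpr ?_]
    intro s hs
    rw [PySem.List.mem_pyRange_one] at hs
    unfold zzDiag
    split
    · rw [PySem.List.pyRange_neg_one_eq_nil (by omega)]; rfl
    · rw [PySem.List.pyRange_one_eq_nil (by omega)]; rfl
  · rw [if_neg hcase]
    have hpar0 : PySem.Int.mod 0 2 = 0 := by decide
    have hw0 := walk_main h_ w (by omega) (by omega) ((h_ + w - 1).toNat) 0 [] (by omega)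
      (by omega)
    rw [if_pos hpar0, decide_eq_true hpar0, show min (0:Int) (h_ - 1) = 0 by omega,
        show (0:Int) - 0 = 0 by ring, fuel_total h_ w (by omega) (by omega),
        List.nil_append] at hw0
    exact hw0.symm
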